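-- pv_equiv track=rewrite | github.com/suiiim/codetest | programmers/python/level2/bruteForce_모음사전.py | solution
-- ===== SOURCE A (Python) =====
-- def solution(word):
--     answer = 0
--     dictionary = {'A': 1, 'E': 2, 'I': 3, 'O': 4, 'U': 5}
--     num_list = list(map(lambda x: dictionary[x], word)) + [0, 0, 0, 0]
--     before_sum = lambda x: sum([(num_list[i] - 1) * 5 ** (x - i) for i in range(min(x, len(word)))])
--
--     for idx, num in enumerate(num_list[:5]):
--         answer += before_sum(idx)
--         answer += num
--
--     return answer
-- ===== SOURCE B (Python) =====
-- def solution(word):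
--     rank = {'A': 0, 'E': 1, 'I': 2, 'O': 3, 'U': 4}
--     answer = 0
--     for i, ch in enumerate(word[:5]):
--         answer += rank[ch] * ((5 ** (5 - i) - 1) // 4) + 1
--     return answer
-- ===== Notes on version B (the rewrite author's own statement) =====
-- stated objective: simpler
-- what changed: Replaces A's zero-padded 5-slot list plus the nested before_sum double summation (re-summing all earlier characters for each of the 5 slots) by one closed-form pass: each character at index i contributes rank*((5**(5-i)-1)//4)+1.
import Mathlib
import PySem

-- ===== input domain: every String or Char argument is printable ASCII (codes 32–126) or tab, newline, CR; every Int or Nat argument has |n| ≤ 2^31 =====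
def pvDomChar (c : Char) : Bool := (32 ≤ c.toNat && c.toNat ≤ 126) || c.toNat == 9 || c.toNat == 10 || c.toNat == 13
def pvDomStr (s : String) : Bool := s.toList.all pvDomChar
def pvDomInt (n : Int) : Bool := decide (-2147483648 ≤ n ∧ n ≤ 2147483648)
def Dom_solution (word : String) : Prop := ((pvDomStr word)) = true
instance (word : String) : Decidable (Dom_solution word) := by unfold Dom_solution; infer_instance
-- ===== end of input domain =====

-- B replaces A's padded 5-slot loop with nested before_sum double summation by a single pass
-- over the (at most 5) characters using the closed-form weight (5^(5-i)-1)//4 per rank; simpler, one pass.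

-- ===== PORT A =====
-- dictionary[x] raises KeyError on non-vowels; those inputs are excluded by Pre_solution,
-- so getD with default 0 is exact on the admitted domain.
def solution (word : String) : Int :=
  let dictionary : PySem.Dict Char Int :=
    ((((PySem.Dict.empty.insert 'A' 1).insert 'E' 2).insert 'I' 3).insert 'O' 4).insert 'U' 5
  let numList : List Int := word.toList.map (fun x => dictionary.getD x 0) ++ [0, 0, 0, 0]
  -- 5 ** (x - i): the exponent is x - i ≥ 1 since i ranges over range(min(x, len(word))); (x-i).toNat is exact
  let beforeSum : Int → Int := fun x =>
    ((PySem.List.pyRange 0 (min x (PySem.Str.len word)) 1).map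
      (fun i => (PySem.List.pyGetD numList i 0 - 1) * 5 ^ (x - i).toNat)).sum
  (PySem.List.enumerate (PySem.List.slice numList none (some 5))).foldl
    (fun answer p => answer + beforeSum p.1 + p.2) 0

-- ===== PORT B =====
-- rank[ch] raises KeyError on non-vowels; excluded by Pre_solution, so getD 0 is exact there.
def solution_alt (word : String) : Int :=
  let rank : PySem.Dict Char Int :=
    ((((PySem.Dict.empty.insert 'A' 0).insert 'E' 1).insert 'I' 2).insert 'O' 3).insert 'U' 4
  (PySem.List.enumerate (PySem.List.slice word.toList none (some 5))).foldl
    (fun answer p =>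
      answer + rank.getD p.2 0 * PySem.Int.floordiv (5 ^ ((5 : Int) - p.1).toNat - 1) 4 + 1) 0

-- ===== PRECONDITION & SPEC =====
-- Pre_ excludes words containing a non-vowel character: there A raises KeyError (dictionary[x]).
def Pre_solution (word : String) : Prop :=
  (word.toList.all (fun c => c ∈ (['A', 'E', 'I', 'O', 'U'] : List Char))) = true
instance (word : String) : Decidable (Pre_solution word) := by unfold Pre_solution; infer_instance

def pvWitness_solution : String := "EIO"

def Spec_solution (word : String) (out : Int) : Prop := out = solution_alt word
instance (word : String) (out : Int) : Decidable (Spec_solution word out) := by unfold Spec_solution; infer_instance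

-- ===== CLAIM (what is proved, stated in full; the proofs are below) =====
def Claim_equal_solution : Prop := ∀ (word : String), Dom_solution word → Pre_solution word → Spec_solution word (solution word)


-- ===== LEMMAS AND PROOFS =====

lemma pv_pr0 : PySem.List.pyRange 0 0 1 = [] := by decide
lemma pv_pr1 : PySem.List.pyRange 0 1 1 = [(0:Int)] := by decide
lemma pv_pr2 : PySem.List.pyRange 0 2 1 = [(0:Int),1] := by decide
lemma pv_pr3 : PySem.List.pyRange 0 3 1 = [(0:Int),1,2] := by decide
lemma pv_pr4 : PySem.List.pyRange 0 4 1 = [(0:Int),1,2,3] := by decide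

-- B's 0-based rank of a vowel is A's 1-based dictionary value minus one
lemma pv_rankv (c : Char) (hc : c ∈ (['A','E','I','O','U']:List Char)) :
    (((((PySem.Dict.empty.insert 'A' (0:Int)).insert 'E' 1).insert 'I' 2).insert 'O' 3).insert 'U' 4).getD c 0
    = (((((PySem.Dict.empty.insert 'A' (1:Int)).insert 'E' 2).insert 'I' 3).insert 'O' 4).insert 'U' 5).getD c 0 - 1 := by
  fin_cases hc <;> decide

-- ===== VERDICT (by name: the statement is the Claim_ definition above) =====
theorem solution_spec : Claim_equal_solution := by
  intro word _ hpre
  unfold Spec_solution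
  have hall : ∀ c ∈ word.toList, c ∈ (['A','E','I','O','U']:List Char) := by
    intro c hcm
    have := hpre
    unfold Pre_solution at this
    rw [List.all_eq_true] at this
    simpa using this c hcm
  match hl : word.toList with
  | [] =>
      simp only [solution, solution_alt, hl, PySem.Str.len_eq]
      rw [PySem.List.slice_to _ (by norm_num), PySem.List.slice_to _ (by norm_num)]
      norm_num [Int.toNat, List.take, PySem.List.enumerate, List.foldl, pv_pr0]
  | [a] =>
      have ha := hall a (by rw [hl]; simp)
      simp only [solution, solution_alt, hl, PySem.Str.len_eq]
      rw [PySem.List.slice_to _ (by norm_num), PySem.List.slice_to _ (by norm_num)]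
      norm_num [Int.toNat, List.take, PySem.List.enumerate, List.foldl, pv_pr0, pv_pr1,
        PySem.List.pyGetD_zero_cons, pv_rankv a ha]
      ring
  | [a, b] =>
      have ha := hall a (by rw [hl]; simp)
      have hb := hall b (by rw [hl]; simp)
      simp only [solution, solution_alt, hl, PySem.Str.len_eq]
      rw [PySem.List.slice_to _ (by norm_num), PySem.List.slice_to _ (by norm_num)]
      norm_num [Int.toNat, List.take, PySem.List.enumerate, List.foldl, pv_pr0, pv_pr1, pv_pr2,
        PySem.List.pyGetD_ofNat', List.getD, pv_rankv a ha, pv_rankv b hb]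
      ring
  | [a, b, c] =>
      have ha := hall a (by rw [hl]; simp)
      have hb := hall b (by rw [hl]; simp)
      have hc := hall c (by rw [hl]; simp)
      simp only [solution, solution_alt, hl, PySem.Str.len_eq]
      rw [PySem.List.slice_to _ (by norm_num), PySem.List.slice_to _ (by norm_num)]
      norm_num [Int.toNat, List.take, PySem.List.enumerate, List.foldl, pv_pr0, pv_pr1, pv_pr2, pv_pr3,
        PySem.List.pyGetD_ofNat', List.getD, pv_rankv a ha, pv_rankv b hb, pv_rankv c hc]
      ring
  | [a, b, c, d] =>
      have ha := hall a (by rw [hl]; simp)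
      have hb := hall b (by rw [hl]; simp)
      have hc := hall c (by rw [hl]; simp)
      have hd := hall d (by rw [hl]; simp)
      simp only [solution, solution_alt, hl, PySem.Str.len_eq]
      rw [PySem.List.slice_to _ (by norm_num), PySem.List.slice_to _ (by norm_num)]
      norm_num [Int.toNat, List.take, PySem.List.enumerate, List.foldl, pv_pr0, pv_pr1, pv_pr2, pv_pr3, pv_pr4,
        PySem.List.pyGetD_ofNat', List.getD, pv_rankv a ha, pv_rankv b hb, pv_rankv c hc, pv_rankv d hd]
      ring
  | a :: b :: c :: d :: e :: rest =>
      have ha := hall a (by rw [hl]; simp)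
      have hb := hall b (by rw [hl]; simp)
      have hc := hall c (by rw [hl]; simp)
      have hd := hall d (by rw [hl]; simp)
      have he := hall e (by rw [hl]; simp)
      simp only [solution, solution_alt, hl, PySem.Str.len_eq, List.length_cons]
      rw [PySem.List.slice_to _ (by norm_num), PySem.List.slice_to _ (by norm_num)]
      have h1 : min (1:Int) ((rest.length:Int)+1+1+1+1+1) = 1 := by omega
      have h2 : min (2:Int) ((rest.length:Int)+1+1+1+1+1) = 2 := by omega
      have h3 : min (3:Int) ((rest.length:Int)+1+1+1+1+1) = 3 := by omega
      have h4 : min (4:Int) ((rest.length:Int)+1+1+1+1+1) = 4 := by omega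
      norm_num [Int.toNat, List.take, PySem.List.enumerate, List.foldl,
        pv_rankv a ha, pv_rankv b hb, pv_rankv c hc, pv_rankv d hd, pv_rankv e he]
      rw [h1, h2, h3, h4]
      norm_num [pv_pr0, pv_pr1, pv_pr2, pv_pr3, pv_pr4, PySem.List.pyGetD_ofNat', List.getD,
        pv_rankv a ha, pv_rankv b hb, pv_rankv c hc, pv_rankv d hd, pv_rankv e he]
      ring
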